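-- pv_equiv track=rewrite | github.com/vikramnitin9/rust_verification | util/function_util.py | _get_spec_lines
-- ===== SOURCE A (Python) =====
-- def _get_spec_lines(i: int, lines: list[str]) -> str:
--     """Extract one specification from the lines of a function.
--
--     Args:
--         i (int): The starting line of the specification.
--         lines (list[str]): The lines of the function source code.
--
--     Returns:
--         str: The extracted specification.
--     """
--     curr_spec = ""
--     open_parens = 0
--     close_parens = 0
--     for line in lines[i:]:
--         open_parens += line.count("(")
--         close_parens += line.count(")")
--         curr_spec += line.strip()
--         if open_parens == close_parens and open_parens > 0:
--             break
--     return curr_spec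
-- ===== SOURCE B (Python) =====
-- def _get_spec_lines(i: int, lines: list[str]) -> str:
--     """Staged re-implementation: build the per-line cumulative paren-count
--     table, look up the first balanced position in it, then join."""
--     tail = lines[i:]
--     prefix = []
--     o = c = 0
--     for line in tail:
--         o += line.count("(")
--         c += line.count(")")
--         prefix.append((o, c))
--     end = next((k for k, (po, pc) in enumerate(prefix) if po == pc and po > 0),
--                len(tail) - 1)
--     return "".join(line.strip() for line in tail[:end + 1])
-- ===== Notes on version B (the rewrite author's own statement) =====
-- stated objective: alternative
-- what changed: A's single fused loop that accumulates the stripped string while counting parens and breaks on balance is replaced by three staged passes: materialise a table of cumulative (open, close) counts per line, find the first balanced entry in that table (falling back to the last line), then join the stripped prefix.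
import Mathlib
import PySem

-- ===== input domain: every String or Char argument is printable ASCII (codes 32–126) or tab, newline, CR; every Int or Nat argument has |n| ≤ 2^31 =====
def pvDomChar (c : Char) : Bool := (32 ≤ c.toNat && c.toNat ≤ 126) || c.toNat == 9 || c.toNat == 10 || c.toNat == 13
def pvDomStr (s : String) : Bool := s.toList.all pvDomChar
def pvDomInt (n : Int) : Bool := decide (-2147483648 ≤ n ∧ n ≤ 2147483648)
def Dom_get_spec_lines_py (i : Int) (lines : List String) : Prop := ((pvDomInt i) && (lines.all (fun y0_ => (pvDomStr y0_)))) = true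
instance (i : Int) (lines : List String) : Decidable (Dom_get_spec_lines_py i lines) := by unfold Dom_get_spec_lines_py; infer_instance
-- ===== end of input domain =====

-- B replaces A's fused accumulate-and-break loop with staged passes: a cumulative paren-count table, a lookup of the first balanced entry, then a join; same cost, different decomposition.

-- ===== PORT A =====
-- the 'for line in lines[i:]' loop of A, carrying (open_parens, close_parens, curr_spec)
def pvAloop : List String → Nat → Nat → String → String
  | [], _, _, acc => acc
  | l :: rest, o, c, acc =>
    let o' := o + PySem.Str.count l "("
    let c' := c + PySem.Str.count l ")"
    let acc' := acc ++ PySem.Str.strip l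
    if o' = c' ∧ 0 < o' then acc' else pvAloop rest o' c' acc'

def get_spec_lines_py (i : Int) (lines : List String) : String :=
  pvAloop (PySem.List.slice lines (some i) none) 0 0 ""

-- ===== PORT B =====
-- B's first pass: the table of cumulative (open, close) counts, one entry per line
def pvCums : List String → Nat → Nat → List (Nat × Nat)
  | [], _, _ => []
  | l :: rest, o, c =>
    let o' := o + PySem.Str.count l "("
    let c' := c + PySem.Str.count l ")"
    (o', c') :: pvCums rest o' c'

def get_spec_lines_py_alt (i : Int) (lines : List String) : String :=
  let tail := PySem.List.slice lines (some i) none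
  let pref := pvCums tail 0 0
  let endIdx :=
    match pref.findIdx? (fun p => p.1 == p.2 && 0 < p.1) with
    | some k => k
    | none => tail.length - 1
  PySem.Str.join "" ((tail.take (endIdx + 1)).map PySem.Str.strip)

-- ===== PRECONDITION & SPEC =====
def Spec_get_spec_lines_py (i : Int) (lines : List String) (out : String) : Prop := out = get_spec_lines_py_alt i lines
instance (i : Int) (lines : List String) (out : String) : Decidable (Spec_get_spec_lines_py i lines out) := by unfold Spec_get_spec_lines_py; infer_instance

-- ===== CLAIM (what is proved, stated in full; the proofs are below) =====
def Claim_equal_get_spec_lines_py : Prop := ∀ (i : Int) (lines : List String), Dom_get_spec_lines_py i lines → Spec_get_spec_lines_py i lines (get_spec_lines_py i lines)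

-- ===== LEMMAS AND PROOFS =====

-- proof-only helper: how many lines A's loop consumes
def pvNb : List String → Nat → Nat → Nat
  | [], _, _ => 0
  | l :: rest, o, c =>
    let o' := o + PySem.Str.count l "("
    let c' := c + PySem.Str.count l ")"
    if o' = c' ∧ 0 < o' then 1 else 1 + pvNb rest o' c'

lemma pvJoin_empty_cons (x : String) (xs : List String) :
    PySem.Str.join "" (x :: xs) = x ++ PySem.Str.join "" xs := by
  cases xs with
  | nil => simp [PySem.Str.join]
  | cons y ys => simp [PySem.Str.join, PySem.Chars.join, List.intercalate, String.ofList_append]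

lemma pvAloop_eq (t : List String) : ∀ (o c : Nat) (acc : String),
    pvAloop t o c acc = acc ++ PySem.Str.join "" ((t.take (pvNb t o c)).map PySem.Str.strip) := by
  induction t with
  | nil => intro o c acc; simp [pvAloop, pvNb, PySem.Str.join]
  | cons l rest ih =>
    intro o c acc
    simp only [pvAloop, pvNb]
    split_ifs with h
    · simp [PySem.Str.join, PySem.Str.strip]
    · rw [ih, Nat.add_comm 1]
      simp [List.take_succ_cons, pvJoin_empty_cons, String.append_assoc]

lemma pvNb_findIdx (t : List String) : ∀ (o c : Nat),
    pvNb t o c =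
      match (pvCums t o c).findIdx? (fun p => p.1 == p.2 && 0 < p.1) with
      | some k => k + 1
      | none => t.length := by
  induction t with
  | nil => intro o c; simp [pvNb, pvCums]
  | cons l rest ih =>
    intro o c
    simp only [pvNb, pvCums, List.findIdx?_cons]
    generalize PySem.Str.count l "(" = a
    generalize PySem.Str.count l ")" = b
    by_cases h : (o + a = c + b) ∧ 0 < o + a
    · have hb : ((o + a == c + b) && decide (0 < o + a)) = true := by
        simp only [Bool.and_eq_true, beq_iff_eq, decide_eq_true_iff]; exact h
      rw [if_pos h, hb]
      rfl
    · have hb : ((o + a == c + b) && decide (0 < o + a)) = false := by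
        rcases Decidable.not_and_iff_or_not.mp h with h1 | h1 <;> simp [h1]
      rw [if_neg h, hb, ih]
      cases hf : (pvCums rest (o + a) (c + b)).findIdx? (fun p => p.1 == p.2 && 0 < p.1) with
      | none => simp [List.length_cons, Nat.add_comm]
      | some k => simp [Nat.add_comm]

lemma pvTake_nb (t : List String) :
    t.take (pvNb t 0 0) =
      t.take ((match (pvCums t 0 0).findIdx? (fun p => p.1 == p.2 && 0 < p.1) with
               | some k => k
               | none => t.length - 1) + 1) := by
  rw [pvNb_findIdx]
  cases hf : (pvCums t 0 0).findIdx? (fun p => p.1 == p.2 && 0 < p.1) with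
  | some k => rfl
  | none =>
    cases t with
    | nil => simp
    | cons x xs => simp [List.length_cons]

-- ===== VERDICT (by name: the statement is the Claim_ definition above) =====
theorem get_spec_lines_py_spec : Claim_equal_get_spec_lines_py := by
  intro i lines _
  unfold Spec_get_spec_lines_py get_spec_lines_py get_spec_lines_py_alt
  rw [pvAloop_eq, pvTake_nb]
  simp
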